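-- pv_equiv track=rewrite | github.com/fernandogitme/telegramBot | bot.py | agrupar_usuarios_por_idioma
-- ===== SOURCE A (Python) =====
-- def agrupar_usuarios_por_idioma(participantes, idioma_detectado):
--     """
--     Agrupa usuarios por idioma, excluyendo aquellos que ya tienen el idioma detectado
--     """
--     usuarios_por_idioma = {}
--
--     for uid, lang in participantes.items():
--         if lang != idioma_detectado:
--             if lang not in usuarios_por_idioma:
--                 usuarios_por_idioma[lang] = []
--             usuarios_por_idioma[lang].append(uid)
--
--     return usuarios_por_idioma
-- ===== SOURCE B (Python) =====
-- def agrupar_usuarios_por_idioma(participantes, idioma_detectado):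
--     """
--     Agrupa usuarios por idioma, excluyendo aquellos que ya tienen el idioma detectado
--     """
--     idiomas = []
--     for uid, lang in participantes.items():
--         if lang != idioma_detectado and lang not in idiomas:
--             idiomas.append(lang)
--     return {l: [uid for uid, g in participantes.items() if g == l]
--             for l in idiomas}
-- ===== Notes on version B (the rewrite author's own statement) =====
-- stated objective: alternative
-- what changed: Replaces the incremental dict-building loop (membership test, empty-list insertion, append per item) by a two-pass scheme: first collect the distinct non-detected languages in first-occurrence order, then build the dict in one comprehension that gathers each language's uids by a scan.
import Mathlib
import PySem

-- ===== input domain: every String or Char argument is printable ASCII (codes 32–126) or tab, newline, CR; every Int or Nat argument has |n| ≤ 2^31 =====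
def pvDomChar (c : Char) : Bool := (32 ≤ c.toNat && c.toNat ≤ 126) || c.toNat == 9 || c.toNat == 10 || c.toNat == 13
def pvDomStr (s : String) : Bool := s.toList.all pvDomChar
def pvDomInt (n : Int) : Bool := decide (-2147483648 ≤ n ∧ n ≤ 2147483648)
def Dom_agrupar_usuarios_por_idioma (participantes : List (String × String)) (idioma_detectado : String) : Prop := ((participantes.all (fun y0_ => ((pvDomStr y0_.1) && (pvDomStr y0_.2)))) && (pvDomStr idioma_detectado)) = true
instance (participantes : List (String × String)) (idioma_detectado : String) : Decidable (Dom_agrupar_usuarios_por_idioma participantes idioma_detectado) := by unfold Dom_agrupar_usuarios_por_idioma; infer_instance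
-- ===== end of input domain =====

-- B replaces A's incremental dict-building with a two-pass scheme (distinct languages first,
-- then one scan per language); alternative decomposition, same return value.


-- ===== PORT A =====
def agrupar_usuarios_por_idioma (participantes : List (String × String)) (idioma_detectado : String) : List (String × List String) :=
  (participantes.foldl
    (fun d p =>
      if p.2 ≠ idioma_detectado then
        let d1 := if d.contains p.2 then d else d.insert p.2 []
        d1.modify p.2 [] (· ++ [p.1])
      else d)
    PySem.Dict.empty).items

-- ===== PORT B =====
def agrupar_usuarios_por_idioma_alt (participantes : List (String × String)) (idioma_detectado : String) : List (String × List String) :=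
  let idiomas := participantes.foldl
    (fun acc p => if p.2 ≠ idioma_detectado ∧ p.2 ∉ acc then acc ++ [p.2] else acc) []
  idiomas.map (fun l =>
    (l, participantes.foldl (fun acc p => if p.2 = l then acc ++ [p.1] else acc) []))

-- ===== PRECONDITION & SPEC =====
def Spec_agrupar_usuarios_por_idioma (participantes : List (String × String)) (idioma_detectado : String) (out : List (String × List String)) : Prop := out = agrupar_usuarios_por_idioma_alt participantes idioma_detectado
instance (participantes : List (String × String)) (idioma_detectado : String) (out : List (String × List String)) : Decidable (Spec_agrupar_usuarios_por_idioma participantes idioma_detectado out) := by unfold Spec_agrupar_usuarios_por_idioma; infer_instance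

-- ===== CLAIM (what is proved, stated in full; the proofs are below) =====
def Claim_equal_agrupar_usuarios_por_idioma : Prop := ∀ (participantes : List (String × String)) (idioma_detectado : String), Dom_agrupar_usuarios_por_idioma participantes idioma_detectado → Spec_agrupar_usuarios_por_idioma participantes idioma_detectado (agrupar_usuarios_por_idioma participantes idioma_detectado)

-- ===== LEMMAS AND PROOFS =====

-- A's "if missing insert []; then append" step is exactly Dict.modify with default [].
theorem pv_step_eq (d : PySem.Dict String (List String)) (k v : String) :
    (if d.contains k then d else d.insert k []).modify k [] (· ++ [v])
      = d.modify k [] (· ++ [v]) := by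
  by_cases h : d.contains k
  · simp [h]
  · simp only [h]
    simp [PySem.Dict.modify, PySem.Dict.insert_insert_self, PySem.Dict.getD_insert_self,
      PySem.Dict.getD_of_not_contains d [] (by simpa using h)]

-- A guarded fold is a fold over the filtered list.
theorem pv_foldl_guard_filter {α β : Type} (p : α → Bool) (g : β → α → β) :
    ∀ (l : List α) (acc : β),
      l.foldl (fun b x => if p x then g b x else b) acc = (l.filter p).foldl g acc := by
  intro l
  induction l with
  | nil => intro acc; rfl
  | cons a t ih =>
    intro acc
    by_cases h : p a
    · simp [List.filter, h, ih]
    · simp [List.filter, h, ih]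

theorem agrupar_usuarios_por_idioma_spec : Claim_equal_agrupar_usuarios_por_idioma := by
  intro ps det _
  unfold Spec_agrupar_usuarios_por_idioma agrupar_usuarios_por_idioma agrupar_usuarios_por_idioma_alt
  set q : String × String → Bool := fun p => decide (p.2 ≠ det) with hq
  set ps' : List (String × String) := ps.filter q with hps'
  -- A's dict as a fold of modify over the filtered list
  have hA : (ps.foldl
      (fun d p =>
        if p.2 ≠ det then
          (if d.contains p.2 then d else d.insert p.2 []).modify p.2 [] (· ++ [p.1])
        else d)
      PySem.Dict.empty)
      = ps'.foldl (fun d p => d.modify p.2 [] (· ++ [p.1])) PySem.Dict.empty := by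
    have hfun : (fun (d : PySem.Dict String (List String)) (p : String × String) =>
        if p.2 ≠ det then
          (if d.contains p.2 then d else d.insert p.2 []).modify p.2 [] (· ++ [p.1])
        else d)
        = (fun d p => if q p then d.modify p.2 [] (· ++ [p.1]) else d) := by
      funext d p
      by_cases h : p.2 ≠ det
      · simp [hq, h, pv_step_eq]
      · simp [hq, h]
    rw [hfun, pv_foldl_guard_filter]
  rw [hA]
  -- B's language list is a Set.add fold over the filtered list
  have hB : (ps.foldl
      (fun (acc : List String) p => if p.2 ≠ det ∧ p.2 ∉ acc then acc ++ [p.2] else acc) [])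
      = PySem.Set.ofList (ps'.map Prod.snd) := by
    have hfun : (fun (acc : List String) (p : String × String) =>
        if p.2 ≠ det ∧ p.2 ∉ acc then acc ++ [p.2] else acc)
        = (fun acc p => if q p then PySem.Set.add acc p.2 else acc) := by
      funext acc p
      by_cases h1 : p.2 ≠ det
      · by_cases h2 : p.2 ∈ acc
        · simp [hq, h1, h2, PySem.Set.add, List.contains_eq_mem]
        · simp [hq, h1, h2, PySem.Set.add, List.contains_eq_mem]
      · simp [hq, h1]
    rw [hfun, pv_foldl_guard_filter, ← List.foldl_map (f := Prod.snd)
      (g := fun (acc : List String) x => PySem.Set.add acc x),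
      ← PySem.Set.update_map_eq_foldl_add, PySem.Set.update_nil_left]
    simp only [List.map_id', hps']
  rw [hB]
  -- characterize A's dict by its items
  set r : PySem.Dict String (List String) :=
    ps'.foldl (fun d p => d.modify p.2 [] (· ++ [p.1])) PySem.Dict.empty with hr
  have hkeysnd : r.keys.Nodup := by
    rw [hr]
    exact PySem.Dict.nodup_keys_foldl_modify_key ps' Prod.snd []
      (fun _ p => (· ++ [p.1])) PySem.Dict.empty (by simp)
  have hkeys : r.keys = PySem.Set.ofList (ps'.map Prod.snd) := by
    rw [hr, PySem.Dict.keys_foldl_modify_key ps' Prod.snd [] (fun _ p => (· ++ [p.1]))]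
    simp [PySem.Set.update_nil_left]
  have hgetD : ∀ c : String, r.getD c [] = (ps'.filter (fun p => p.2 == c)).map Prod.fst := by
    intro c
    have : r = (ps'.map Prod.swap).foldl
        (fun d p => d.modify p.1 [] (fun x => x ++ [p.2])) PySem.Dict.empty := by
      rw [hr, List.foldl_map]
      rfl
    rw [this, PySem.Dict.getD_foldl_modify_append]
    simp [List.filter_map, Function.comp_def, Prod.swap]
  rw [PySem.Dict.items_eq_map_keys r hkeysnd [], hkeys]
  -- pointwise equality of the two maps over the distinct-language list
  apply List.map_congr_left
  intro l hl
  have hlne : l ≠ det := by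
    have : l ∈ ps'.map Prod.snd := by
      simpa using (PySem.Set.mem_ofList (ps'.map Prod.snd) l).mp hl
    rcases List.mem_map.mp this with ⟨p, hp, rfl⟩
    have := List.of_mem_filter hp
    simpa [hq] using this
  have hfold : ps.foldl (fun (acc : List String) p => if p.2 = l then acc ++ [p.1] else acc) []
      = (ps.filter (fun p => p.2 == l)).map Prod.fst := by
    have hfun : (fun (acc : List String) (p : String × String) =>
        if p.2 = l then acc ++ [p.1] else acc)
        = (fun acc p => if (p.2 == l) then acc ++ [p.1] else acc) := by
      funext acc p; simp [beq_iff_eq]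
    rw [hfun]
    simpa using PySem.List.foldl_append_if (fun p : String × String => p.2 == l) Prod.fst ps []
  have hfilter : ps.filter (fun p => p.2 == l) = ps'.filter (fun p => p.2 == l) := by
    rw [hps', List.filter_filter]
    apply List.filter_congr
    intro p _
    by_cases h : p.2 = l
    · simp [hq, h, hlne]
    · simp [h]
  simp only [hgetD, hfold, hfilter]
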